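-- pv_equiv track=rewrite | github.com/Farouk568-f/moviebox-aPI | movie_search_logic.py | find_best_match
-- ===== SOURCE A (Python) =====
-- from typing import Dict, List, Any, Optional
--
-- def find_best_match(keyword: str, items: list) -> Optional[Dict[str, Any]]:
--     """
--     البحث عن أفضل تطابق للكلمة المفتاحية
--     """
--     if not items:
--         return None
--
--     clean_keyword = keyword.lower().strip()
--     scored_items = []
--
--     for item in items:
--         title = item.get('title', '').lower()
--         score = 0
--         if clean_keyword == title:
--             score += 100
--         elif clean_keyword in title:
--             score += 80
--         scored_items.append((item, score))
--
--     scored_items.sort(key=lambda x: x[1], reverse=True)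
--
--     if scored_items and scored_items[0][1] > 0:
--         return scored_items[0][0]
--
--     return items[0] if items else None
-- ===== SOURCE B (Python) =====
-- from typing import Dict, List, Any, Optional
--
-- def find_best_match(keyword: str, items: list) -> Optional[Dict[str, Any]]:
--     """Two short-circuit passes instead of scoring + sorting."""
--     if not items:
--         return None
--     clean = keyword.lower().strip()
--     exact = next((it for it in items if it.get('title', '').lower() == clean), None)
--     if exact is not None:
--         return exact
--     sub = next((it for it in items if clean in it.get('title', '').lower()), None)
--     if sub is not None:
--         return sub
--     return items[0]
-- ===== Notes on version B (the rewrite author's own statement) =====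
-- stated objective: simpler
-- what changed: Replaces the per-item scoring list plus stable reverse sort with two short-circuit linear searches (first exact title match, else first substring match, else items[0]), exploiting that the stable descending sort's head is just the first maximally-scored item.
import Mathlib
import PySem

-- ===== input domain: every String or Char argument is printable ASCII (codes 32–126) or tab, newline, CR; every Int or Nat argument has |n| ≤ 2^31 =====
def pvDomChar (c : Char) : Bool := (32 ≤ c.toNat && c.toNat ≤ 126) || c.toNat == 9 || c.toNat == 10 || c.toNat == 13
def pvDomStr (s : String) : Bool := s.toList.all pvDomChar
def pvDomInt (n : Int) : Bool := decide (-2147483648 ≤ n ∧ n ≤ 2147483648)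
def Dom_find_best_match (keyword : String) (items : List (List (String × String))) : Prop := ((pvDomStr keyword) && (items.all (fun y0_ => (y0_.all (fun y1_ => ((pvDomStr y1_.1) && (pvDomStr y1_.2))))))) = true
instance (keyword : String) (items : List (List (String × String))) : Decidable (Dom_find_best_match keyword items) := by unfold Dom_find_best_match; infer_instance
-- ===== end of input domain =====

-- B replaces A's score-list + stable reverse sort with two short-circuit linear searches (simpler, one less pass and no sort).


-- ===== PORT A =====
def find_best_match (keyword : String) (items : List (List (String × String))) : Option (List (String × String)) :=
  if items = [] then none
  else
    let clean_keyword := PySem.Str.strip (PySem.Str.lower keyword)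
    let scored_items := items.foldl (fun acc item =>
      let title := PySem.Str.lower (PySem.Dict.getD ⟨item⟩ "title" "")
      let score : Int := if clean_keyword = title then 100 else if PySem.Str.isIn clean_keyword title then 80 else 0
      acc ++ [(item, score)]) []
    match PySem.List.sorted scored_items (fun x => x.2) true with
    | p :: _ =>
      if p.2 > 0 then some p.1
      else match items with | it0 :: _ => some it0 | [] => none
    | [] => match items with | it0 :: _ => some it0 | [] => none

-- ===== PORT B =====
def find_best_match_alt (keyword : String) (items : List (List (String × String))) : Option (List (String × String)) :=
  match items with
  | [] => none
  | first :: _ =>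
    let clean := PySem.Str.strip (PySem.Str.lower keyword)
    match items.find? (fun it => PySem.Str.lower (PySem.Dict.getD ⟨it⟩ "title" "") == clean) with
    | some it => some it
    | none =>
      match items.find? (fun it => PySem.Str.isIn clean (PySem.Str.lower (PySem.Dict.getD ⟨it⟩ "title" ""))) with
      | some it => some it
      | none => some first

-- ===== PRECONDITION & SPEC =====
def Spec_find_best_match (keyword : String) (items : List (List (String × String))) (out : Option (List (String × String))) : Prop := out = find_best_match_alt keyword items
instance (keyword : String) (items : List (List (String × String))) (out : Option (List (String × String))) : Decidable (Spec_find_best_match keyword items out) := by unfold Spec_find_best_match; infer_instance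

-- ===== CLAIM (what is proved, stated in full; the proofs are below) =====
def Claim_equal_find_best_match : Prop := ∀ (keyword : String) (items : List (List (String × String))), Dom_find_best_match keyword items → Spec_find_best_match keyword items (find_best_match keyword items)

-- ===== LEMMAS AND PROOFS =====

-- proof-only helpers: "first element with maximal key", as a fold step and structurally
def pvPick {α : Type} (key : α → Int) (m : Option α) (x : α) : Option α :=
  match m with
  | none => some x
  | some p => if key p < key x then some x else some p

def pvFirstMax {α : Type} (key : α → Int) : List α → Option α
  | [] => none
  | x :: xs =>
    match pvFirstMax key xs with
    | none => some x
    | some m => if key x < key m then some m else some x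

def pvTitle (it : List (String × String)) : String :=
  PySem.Str.lower (PySem.Dict.getD ⟨it⟩ "title" "")

def pvScore (clean : String) (it : List (String × String)) : Int :=
  if clean = pvTitle it then 100 else if PySem.Str.isIn clean (pvTitle it) then 80 else 0

-- head of a stable descending insertion: inserting x changes the head iff x's key is strictly larger
lemma pvHead_insertBy {α : Type} (key : α → Int) (x : α) (acc : List α) :
    (PySem.List.insertBy (fun a b => decide (key b < key a)) x acc).head? = pvPick key acc.head? x := by
  cases acc with
  | nil => simp [PySem.List.insertBy, pvPick]
  | cons y ys =>
    by_cases h : key y < key x <;> simp [PySem.List.insertBy, pvPick, h]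

lemma pvFoldl_insert_head {α : Type} (key : α → Int) (xs : List α) :
    ∀ acc : List α,
      (xs.foldl (fun acc x => PySem.List.insertBy (fun a b => decide (key b < key a)) x acc) acc).head?
        = xs.foldl (pvPick key) acc.head? := by
  induction xs with
  | nil => intro acc; rfl
  | cons x xs ih =>
    intro acc
    simp only [List.foldl_cons]
    rw [ih, pvHead_insertBy]

-- Python's stable reverse sort: its head is the first element with maximal key
lemma pvSorted_rev_head {α : Type} (key : α → Int) (xs : List α) :
    (PySem.List.sorted xs key true).head? = xs.foldl (pvPick key) none := by
  rw [PySem.List.sorted_rev_eq_foldl_insertBy]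
  simpa using pvFoldl_insert_head key xs []

lemma pvFoldl_pick_some {α : Type} (key : α → Int) (xs : List α) :
    ∀ a : α, xs.foldl (pvPick key) (some a)
      = match pvFirstMax key xs with
        | none => some a
        | some m => if key a < key m then some m else some a := by
  induction xs with
  | nil => intro a; rfl
  | cons x xs ih =>
    intro a
    have hstep : ((x :: xs).foldl (pvPick key) (some a))
        = xs.foldl (pvPick key) (some (if key a < key x then x else a)) := by
      simp only [List.foldl_cons, pvPick]; split <;> rfl
    rw [hstep, ih]
    rcases h : pvFirstMax key xs with _ | m <;>
      simp only [pvFirstMax, h] <;> split_ifs <;> simp_all <;> omega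

lemma pvFoldl_pick_eq_firstMax {α : Type} (key : α → Int) (xs : List α) :
    xs.foldl (pvPick key) none = pvFirstMax key xs := by
  cases xs with
  | nil => rfl
  | cons x xs =>
    have h1 : (x :: xs).foldl (pvPick key) none = xs.foldl (pvPick key) (some x) := rfl
    rw [h1, pvFoldl_pick_some]
    rfl

lemma pvScore_cases (clean : String) (it : List (String × String)) :
    pvScore clean it = 100 ∨ pvScore clean it = 80 ∨ pvScore clean it = 0 := by
  unfold pvScore; split_ifs <;> simp

-- what it means for p to be the winning (item, score) pair of A's sort
def pvGood (clean : String) (items : List (List (String × String)))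
    (p : (List (String × String)) × Int) : Prop :=
  (p.2 = 100 ∧ items.find? (fun it => pvTitle it == clean) = some p.1)
  ∨ (p.2 = 80 ∧ items.find? (fun it => pvTitle it == clean) = none
       ∧ items.find? (fun it => PySem.Str.isIn clean (pvTitle it)) = some p.1)
  ∨ (p.2 = 0 ∧ items.find? (fun it => pvTitle it == clean) = none
       ∧ items.find? (fun it => PySem.Str.isIn clean (pvTitle it)) = none)

lemma pvScore_eq_100_iff (clean : String) (it : List (String × String)) :
    pvScore clean it = 100 ↔ clean = pvTitle it := by
  unfold pvScore; split_ifs <;> simp_all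

lemma pvScore_eq_80_iff (clean : String) (it : List (String × String)) :
    pvScore clean it = 80 ↔ (¬ clean = pvTitle it ∧ PySem.Str.isIn clean (pvTitle it) = true) := by
  unfold pvScore; split_ifs <;> simp_all

lemma pvScore_eq_0_iff (clean : String) (it : List (String × String)) :
    pvScore clean it = 0 ↔ (¬ clean = pvTitle it ∧ ¬ PySem.Str.isIn clean (pvTitle it) = true) := by
  unfold pvScore; split_ifs <;> simp_all

lemma pvEx_true {clean t : String} (h : clean = t) : (t == clean) = true := by
  simp [h]

lemma pvEx_false {clean t : String} (h : ¬ clean = t) : ¬ (t == clean) = true := by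
  simp
  exact fun hh => h hh.symm

lemma pvFirstMax_eq_none {α : Type} (key : α → Int) (xs : List α)
    (h : pvFirstMax key xs = none) : xs = [] := by
  cases xs with
  | nil => rfl
  | cons x xs =>
    exfalso
    simp only [pvFirstMax] at h
    cases h' : pvFirstMax key xs with
    | none => rw [h'] at h; simp at h
    | some m => rw [h'] at h; by_cases hc : key x < key m <;> simp [hc] at h

lemma pvMain (clean : String) :
    ∀ (items : List (List (String × String))) (p : (List (String × String)) × Int),
      pvFirstMax (fun x => x.2) (items.map (fun it => (it, pvScore clean it))) = some p →
      pvGood clean items p := by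
  intro items
  induction items with
  | nil => intro p h; simp [pvFirstMax] at h
  | cons it its ih =>
    intro p h
    rcases hrest : pvFirstMax (fun x : (List (String × String)) × Int => x.2)
        (its.map (fun it => (it, pvScore clean it))) with _ | m
    · simp only [List.map_cons, pvFirstMax, hrest] at h
      have hits : its = [] := by
        have := pvFirstMax_eq_none _ _ hrest
        simpa using this
      subst hits
      obtain rfl : p = (it, pvScore clean it) := (Option.some.inj h).symm
      rcases pvScore_cases clean it with h100 | h80 | h0
      · have hx := (pvScore_eq_100_iff clean it).mp h100
        exact Or.inl ⟨h100, List.find?_cons_of_pos (p := fun it => pvTitle it == clean) (pvEx_true hx)⟩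
      · have hx := (pvScore_eq_80_iff clean it).mp h80
        refine Or.inr (Or.inl ⟨h80, ?_, List.find?_cons_of_pos (p := fun it => PySem.Str.isIn clean (pvTitle it)) hx.2⟩)
        rw [List.find?_cons_of_neg (p := fun it => pvTitle it == clean) (pvEx_false hx.1)]; rfl
      · have hx := (pvScore_eq_0_iff clean it).mp h0
        refine Or.inr (Or.inr ⟨h0, ?_, ?_⟩)
        · rw [List.find?_cons_of_neg (p := fun it => pvTitle it == clean) (pvEx_false hx.1)]; rfl
        · rw [List.find?_cons_of_neg (p := fun it => PySem.Str.isIn clean (pvTitle it)) hx.2]; rfl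
    · simp only [List.map_cons, pvFirstMax, hrest] at h
      have hm := ih m hrest
      by_cases hlt : pvScore clean it < m.2
      · rw [if_pos hlt] at h
        obtain rfl : p = m := (Option.some.inj h).symm
        rcases hm with ⟨h2, hf⟩ | ⟨h2, hf1, hf2⟩ | ⟨h2, hf1, hf2⟩
        · -- the winner is exact; `it` scores below 100 so is not exact
          have hne : ¬ clean = pvTitle it := fun hh =>
            absurd ((pvScore_eq_100_iff clean it).mpr hh) (by omega)
          exact Or.inl ⟨h2, by rw [List.find?_cons_of_neg (p := fun it => pvTitle it == clean) (pvEx_false hne)]; exact hf⟩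
        · -- the winner is a substring match; `it` scores below 80 so scores 0
          have h0 : pvScore clean it = 0 := by
            rcases pvScore_cases clean it with h' | h' | h' <;> omega
          have hx := (pvScore_eq_0_iff clean it).mp h0
          refine Or.inr (Or.inl ⟨h2, ?_, ?_⟩)
          · rw [List.find?_cons_of_neg (p := fun it => pvTitle it == clean) (pvEx_false hx.1)]; exact hf1
          · rw [List.find?_cons_of_neg (p := fun it => PySem.Str.isIn clean (pvTitle it)) hx.2]; exact hf2
        · -- a score strictly below 0 is impossible
          exfalso; rcases pvScore_cases clean it with h' | h' | h' <;> omega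
      · rw [if_neg hlt] at h
        obtain rfl : p = (it, pvScore clean it) := (Option.some.inj h).symm
        rcases pvScore_cases clean it with h100 | h80 | h0
        · have hx := (pvScore_eq_100_iff clean it).mp h100
          exact Or.inl ⟨h100, List.find?_cons_of_pos (p := fun it => pvTitle it == clean) (pvEx_true hx)⟩
        · -- `it` is the first substring match and no exact match exists anywhere
          have hx := (pvScore_eq_80_iff clean it).mp h80
          have hfex : its.find? (fun it => pvTitle it == clean) = none := by
            rcases hm with ⟨h2, _⟩ | ⟨_, hf1, _⟩ | ⟨_, hf1, _⟩
            · omega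
            · exact hf1
            · exact hf1
          refine Or.inr (Or.inl ⟨h80, ?_, List.find?_cons_of_pos (p := fun it => PySem.Str.isIn clean (pvTitle it)) hx.2⟩)
          rw [List.find?_cons_of_neg (p := fun it => pvTitle it == clean) (pvEx_false hx.1)]; exact hfex
        · -- everything scores 0: no match anywhere
          have hx := (pvScore_eq_0_iff clean it).mp h0
          obtain ⟨hf1, hf2⟩ :
              its.find? (fun it => pvTitle it == clean) = none ∧
              its.find? (fun it => PySem.Str.isIn clean (pvTitle it)) = none := by
            rcases hm with ⟨h2, _⟩ | ⟨h2, _⟩ | ⟨_, hf1, hf2⟩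
            · omega
            · omega
            · exact ⟨hf1, hf2⟩
          refine Or.inr (Or.inr ⟨h0, ?_, ?_⟩)
          · rw [List.find?_cons_of_neg (p := fun it => pvTitle it == clean) (pvEx_false hx.1)]; exact hf1
          · rw [List.find?_cons_of_neg (p := fun it => PySem.Str.isIn clean (pvTitle it)) hx.2]; exact hf2

-- ===== VERDICT (by name: the statement is the Claim_ definition above) =====
theorem find_best_match_spec : Claim_equal_find_best_match := by
  intro keyword items _
  unfold Spec_find_best_match
  cases items with
  | nil => rfl
  | cons it0 its =>
    unfold find_best_match find_best_match_alt
    rw [if_neg (by simp)]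
    simp only [PySem.List.foldl_append_singleton_eq_map]
    set clean := PySem.Str.strip (PySem.Str.lower keyword) with hclean
    have hmapeq : ((it0 :: its).map (fun item =>
        (item, if clean = PySem.Str.lower (PySem.Dict.getD ⟨item⟩ "title" "") then (100:Int)
               else if PySem.Str.isIn clean (PySem.Str.lower (PySem.Dict.getD ⟨item⟩ "title" "")) then 80 else 0)))
        = ((it0 :: its).map (fun item => (item, pvScore clean item))) := by
      simp [pvScore, pvTitle]
    rw [hmapeq]
    simp only [List.nil_append]
    rcases hsort : PySem.List.sorted ((it0 :: its).map (fun item => (item, pvScore clean item))) (fun x => x.2) true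
      with _ | ⟨p, rest⟩
    · exact absurd ((PySem.List.sorted_eq_nil_iff _ _ _).mp hsort) (by simp)
    · have hhead : pvFirstMax (fun x : (List (String × String)) × Int => x.2)
          ((it0 :: its).map (fun item => (item, pvScore clean item))) = some p := by
        rw [← pvFoldl_pick_eq_firstMax, ← pvSorted_rev_head, hsort]; rfl
      have hgood := pvMain clean (it0 :: its) p hhead
      rcases hgood with ⟨h2, hf⟩ | ⟨h2, hf1, hf2⟩ | ⟨h2, hf1, hf2⟩
      · show (if p.2 > 0 then some p.1 else some it0) = _
        rw [if_pos (show p.2 > 0 by omega)]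
        simp only [pvTitle] at hf
        rw [hf]
      · show (if p.2 > 0 then some p.1 else some it0) = _
        rw [if_pos (show p.2 > 0 by omega)]
        simp only [pvTitle] at hf1 hf2
        rw [hf1, hf2]
      · show (if p.2 > 0 then some p.1 else some it0) = _
        rw [if_neg (show ¬ p.2 > 0 by omega)]
        simp only [pvTitle] at hf1 hf2
        rw [hf1, hf2]
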